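-- pv_equiv track=rewrite | github.com/avDec25/codemore | 2sumtotal.py | func
-- ===== SOURCE A (Python) =====
-- def func(a):
--     n = len(a)
--     mp = {}
--     for i in range(n):
--         mp[a[i]] = mp.get(a[i], 0) + 1
--
--     count = 0
--     for i in range(n):
--         if (a[i] != 1000-a[i]) and 1000 - a[i] in mp:
--             count += 1
--
--     return count
-- ===== SOURCE B (Python) =====
-- def func(a):
--     b = sorted(a)
--     vals = []
--     cnts = []
--     for v in b:
--         if vals and vals[-1] == v:
--             cnts[-1] += 1
--         else:
--             vals.append(v)
--             cnts.append(1)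
--     total = 0
--     i, j = 0, len(vals) - 1
--     while i <= j:
--         s = vals[i] + vals[j]
--         if s < 1000:
--             i += 1
--         elif s > 1000:
--             j -= 1
--         else:
--             if vals[i] != 500:
--                 total += cnts[i]
--                 if i != j:
--                     total += cnts[j]
--             i += 1
--             j -= 1
--     return total
-- ===== Notes on version B (the rewrite author's own statement) =====
-- stated objective: alternative
-- what changed: B drops A's hash map entirely: it sorts the list, run-length encodes it into distinct values with multiplicities in one scan, and finds complement pairs with the classic 2-sum two-pointer scan over the sorted values instead of hash membership tests.
import Mathlib
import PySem

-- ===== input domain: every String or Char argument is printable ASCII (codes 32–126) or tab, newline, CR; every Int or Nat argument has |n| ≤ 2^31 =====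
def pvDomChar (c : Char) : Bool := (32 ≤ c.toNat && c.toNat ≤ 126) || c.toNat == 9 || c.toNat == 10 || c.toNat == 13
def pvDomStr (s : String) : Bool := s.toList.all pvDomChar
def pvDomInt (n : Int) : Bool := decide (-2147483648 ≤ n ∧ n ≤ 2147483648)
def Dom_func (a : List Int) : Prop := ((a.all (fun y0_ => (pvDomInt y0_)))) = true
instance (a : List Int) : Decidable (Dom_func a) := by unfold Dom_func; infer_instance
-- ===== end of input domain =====

-- B drops A's hash map: it sorts the list, run-length encodes it into distinct values
-- with multiplicities, and pairs complements with the classic 2-sum two-pointer scan (objective: alternative).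

-- ===== PORT A =====
def func (a : List Int) : Int :=
  let mp : PySem.Dict Int Int := a.foldl (fun d x => d.insert x (d.getD x 0 + 1)) PySem.Dict.empty
  a.foldl (fun count x => if x ≠ 1000 - x ∧ mp.contains (1000 - x) = true then count + 1 else count) 0

-- ===== PORT B =====
-- the while loop of Source B; indices stay Int; vals[i]/vals[j]/cnts[i]/cnts[j] are always
-- in range when the guard i ≤ j holds (0 ≤ i, j < len vals throughout), so pyGetD is exact here
def twoPtr (vals cnts : List Int) (i j total : Int) : Int :=
  if _h : i ≤ j then
    let x := PySem.List.pyGetD vals i 0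
    let y := PySem.List.pyGetD vals j 0
    if x + y < 1000 then twoPtr vals cnts (i + 1) j total
    else if x + y > 1000 then twoPtr vals cnts i (j - 1) total
    else
      twoPtr vals cnts (i + 1) (j - 1)
        (if x ≠ 500 then
          total + PySem.List.pyGetD cnts i 0 +
            (if i ≠ j then PySem.List.pyGetD cnts j 0 else 0)
        else total)
  else total
termination_by (j + 1 - i).toNat
decreasing_by all_goals omega

-- one step of Source B's run-length loop over the sorted list (vals, cnts as a pair of lists)
def rleStep (p : List Int × List Int) (v : Int) : List Int × List Int :=
  if p.1 ≠ [] ∧ p.1.getLast? = some v then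
    (p.1, p.2.dropLast ++ [p.2.getLast?.getD 0 + 1])
  else (p.1 ++ [v], p.2 ++ [1])

def func_alt (a : List Int) : Int :=
  let b := PySem.List.sorted a (fun x => x) false
  let vc := b.foldl rleStep ([], [])
  twoPtr vc.1 vc.2 0 ((vc.1.length : Int) - 1) 0

-- ===== PRECONDITION & SPEC =====
def Spec_func (a : List Int) (out : Int) : Prop := out = func_alt a
instance (a : List Int) (out : Int) : Decidable (Spec_func a out) := by unfold Spec_func; infer_instance

-- ===== CLAIM (what is proved, stated in full; the proofs are below) =====
def Claim_equal_func : Prop := ∀ (a : List Int), Dom_func a → Spec_func a (func a)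

-- ===== LEMMAS AND PROOFS =====

-- contribution of one distinct value v to the answer
def pvF (vals a : List Int) (v : Int) : Int :=
  if v ≠ 500 ∧ (1000 - v) ∈ vals then (a.count v : Int) else 0

theorem pv_sum_ite_filter (l : List Int) (p : Int → Prop) [DecidablePred p] (c : Int → Int) :
    (l.map (fun k => if p k then c k else 0)).sum
      = ((l.filter (fun x => decide (p x))).map c).sum := by
  induction l with
  | nil => simp
  | cons x xs ih => by_cases hx : p x <;> simp [hx, ih]

-- summing each distinct value's multiplicity under a filter counts the filtered elements
theorem pv_key (a : List Int) (p : Int → Prop) [DecidablePred p] :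
    ((PySem.Set.ofList a).map (fun k => if p k then (a.count k : Int) else 0)).sum
      = (a.countP (fun x => decide (p x)) : Int) := by
  have hperm : List.Perm (PySem.Set.ofList a) a.dedup := by
    refine (List.perm_ext_iff_of_nodup ?_ a.nodup_dedup).mpr ?_
    · exact PySem.Set.nodup_ofList a
    · intro x; simp [PySem.Set.mem_ofList, List.mem_dedup]
  rw [(hperm.map _).sum_eq, pv_sum_ite_filter]
  rw [← List.sum_map_count_dedup_filter_eq_countP (fun x => decide (p x)) a]
  induction (a.dedup.filter (fun x => decide (p x))) with
  | nil => simp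
  | cons y ys ih => simp [ih]

-- the two-pointer loop, run on the window W of vals (vals = u ++ W ++ r), adds exactly
-- the contributions of the window's values, provided partners of window values stay in the window
-- vals[u.length + k] is W[k] when vals = u ++ W ++ r
theorem pv_getW (vals u W r : List Int) (hdec : vals = u ++ W ++ r)
    (k : Nat) (hk : k < W.length) :
    vals[u.length + k]'(by simp [hdec]; omega) = W[k] := by
  subst hdec
  rw [List.getElem_append_left (by simp; omega)]
  rw [List.getElem_append_right (by omega)]
  congr 1
  omega

theorem pv_twoPtr (vals cnts a : List Int) (hs : List.Pairwise (· < ·) vals)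
    (hcnts : cnts = vals.map (fun v => (a.count v : Int))) :
    ∀ (n : Nat) (W u r : List Int) (total i j : Int), W.length = n →
      vals = u ++ W ++ r →
      i = (u.length : Int) → j = i + W.length - 1 →
      (∀ v ∈ W, (1000 - v) ∈ vals → (1000 - v) ∈ W) →
      twoPtr vals cnts i j total = total + (W.map (pvF vals a)).sum := by
  subst hcnts
  intro n
  induction n using Nat.strong_induction_on with
  | _ n ih =>
  intro W u r total i j hlen hdec hi hj hcl
  match W, hlen with
  | [], hlen =>
    rw [twoPtr, dif_neg (by simp at hj; omega)]
    simp
  | x :: W1, hlen =>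
    have hlv : vals.length = u.length + (W1.length + 1) + r.length := by
      simp [hdec]; omega
    have hij : i ≤ j := by simp at hj; omega
    have hxe : vals[u.length]'(by omega) = x := by
      have := pv_getW vals u (x :: W1) r hdec 0 (by simp)
      simpa using this
    have hx : PySem.List.pyGetD vals i 0 = x := by
      rw [hi, PySem.List.pyGetD_natCast]
      rw [List.getD_eq_getElem _ _ (by omega)]
      exact hxe
    have hcx : PySem.List.pyGetD (vals.map (fun v => (a.count v : Int))) i 0
        = (a.count x : Int) := by
      rw [hi, PySem.List.pyGetD_natCast]
      rw [List.getD_eq_getElem _ _ (by simp; omega)]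
      simp only [List.getElem_map, hxe]
    have hsubW : ∀ v ∈ (x :: W1), v ∈ vals := by
      intro v hv
      rw [hdec]
      exact List.mem_append.mpr (Or.inl (List.mem_append.mpr (Or.inr hv)))
    have hWp : (x :: W1).Pairwise (· < ·) :=
      hs.sublist (List.IsInfix.sublist ⟨u, r, hdec.symm⟩)
    rcases List.eq_nil_or_concat W1 with h1 | ⟨mid, y, h1⟩
    · -- singleton window: i = j, x = y
      subst h1
      have hji : j = i := by simp at hj; omega
      have hy : PySem.List.pyGetD vals j 0 = x := by rw [hji, hx]
      rw [twoPtr, dif_pos hij]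
      simp only [hx, hy]
      rcases lt_trichotomy (x + x) 1000 with hlt | heq | hgt
      · rw [if_pos hlt, twoPtr, dif_neg (by omega)]
        have hnp : (1000 - x) ∉ vals := by
          intro hmem
          have := hcl x (by simp) hmem
          simp at this; omega
        simp [pvF, hnp]
      · rw [if_neg (by omega), if_neg (by omega)]
        have hx500 : x = 500 := by omega
        rw [if_neg (by omega), twoPtr, dif_neg (by omega)]
        simp [pvF, hx500]
      · rw [if_neg (by omega), if_pos hgt, twoPtr, dif_neg (by omega)]
        have hnp : (1000 - x) ∉ vals := by
          intro hmem
          have := hcl x (by simp) hmem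
          simp at this; omega
        simp [pvF, hnp]
    · -- window of length ≥ 2: head x, last y
      rw [List.concat_eq_append] at h1
      subst h1
      have hjk : j = ((u.length + (mid.length + 1) : Nat) : Int) := by
        simp at hj ⊢; omega
      have hye : vals[u.length + (mid.length + 1)]'(by simp at hlv; omega) = y := by
        have := pv_getW vals u (x :: (mid ++ [y])) r hdec (mid.length + 1) (by simp)
        have hyW : (x :: (mid ++ [y]))[mid.length + 1]'(by simp) = y := by
          rw [List.getElem_cons_succ]
          rw [List.getElem_append_right (by omega)]
          simp
        rw [hyW] at this
        exact this
      have hy : PySem.List.pyGetD vals j 0 = y := by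
        rw [hjk, PySem.List.pyGetD_natCast]
        rw [List.getD_eq_getElem _ _ (by simp at hlv; omega)]
        exact hye
      have hcy : PySem.List.pyGetD (vals.map (fun v => (a.count v : Int))) j 0
          = (a.count y : Int) := by
        rw [hjk, PySem.List.pyGetD_natCast]
        rw [List.getD_eq_getElem _ _ (by simp at hlv ⊢; omega)]
        simp only [List.getElem_map, hye]
      -- order facts in the window
      have hxy : x < y := by
        rcases List.pairwise_cons.mp hWp with ⟨hxall, _⟩
        exact hxall y (by simp)
      have hub : ∀ v ∈ (x :: (mid ++ [y])), v ≤ y := by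
        intro v hv
        rcases List.pairwise_cons.mp hWp with ⟨hxall, hrest⟩
        rcases List.mem_cons.mp hv with hv | hv
        · omega
        · rcases List.mem_append.mp hv with hm | hm
          · have := (List.pairwise_append.mp hrest).2.2 v hm y (by simp)
            omega
          · simp at hm; omega
      have hlb : ∀ v ∈ (x :: (mid ++ [y])), x ≤ v := by
        intro v hv
        rcases List.pairwise_cons.mp hWp with ⟨hxall, _⟩
        rcases List.mem_cons.mp hv with hv | hv
        · omega
        · have := hxall v hv; omega
      have hmidlt : ∀ v ∈ mid, x < v ∧ v < y := by
        intro v hm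
        rcases List.pairwise_cons.mp hWp with ⟨hxall, hrest⟩
        refine ⟨hxall v (by simp [hm]), ?_⟩
        have := (List.pairwise_append.mp hrest).2.2 v hm y (by simp)
        omega
      rw [twoPtr, dif_pos hij]
      simp only [hx, hy]
      rcases lt_trichotomy (x + y) 1000 with hlt | heq | hgt
      · -- drop the head x: its partner exceeds every window value
        rw [if_pos hlt]
        have hnp : (1000 - x) ∉ vals := by
          intro hmem
          have := hub _ (hcl x (by simp) hmem)
          omega
        have hcl' : ∀ v ∈ mid ++ [y], (1000 - v) ∈ vals → (1000 - v) ∈ mid ++ [y] := by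
          intro v hv hmem
          have hw := hcl v (List.mem_cons_of_mem x hv) hmem
          rcases List.mem_cons.mp hw with hw | hw
          · exfalso
            apply hnp
            rw [show (1000 : Int) - x = v by omega]
            exact hsubW v (List.mem_cons_of_mem x hv)
          · exact hw
        have hrec := ih (mid ++ [y]).length (by simp at hlen ⊢; omega)
          (mid ++ [y]) (u ++ [x]) r total (i + 1) j rfl
          (by rw [hdec]; simp)
          (by simp [hi])
          (by simp at hj ⊢; omega) hcl'
        rw [hrec]
        have hfx : pvF vals a x = 0 := by simp [pvF, hnp]
        simp [hfx]
      · -- matched pair x + y = 1000: count both ends, shrink both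
        rw [if_neg (by omega), if_neg (by omega)]
        have hx500 : x ≠ 500 := by omega
        have hijne : i ≠ j := by simp at hj; omega
        rw [hcx, hcy, if_pos hx500, if_pos hijne]
        have hclm : ∀ v ∈ mid, (1000 - v) ∈ vals → (1000 - v) ∈ mid := by
          intro v hm hmem
          have hw := hcl v (by simp [hm]) hmem
          have hvx := (hmidlt v hm).1
          have hvy := (hmidlt v hm).2
          rcases List.mem_cons.mp hw with hw | hw
          · omega
          · rcases List.mem_append.mp hw with hw | hw
            · exact hw
            · simp at hw; omega
        have hrec := ih mid.length (by simp at hlen ⊢; omega)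
          mid (u ++ [x]) (y :: r) (total + (a.count x : Int) + (a.count y : Int)) (i + 1) (j - 1) rfl
          (by rw [hdec]; simp)
          (by simp [hi])
          (by simp at hj ⊢; omega) hclm
        rw [hrec]
        have hfx : pvF vals a x = (a.count x : Int) := by
          have : (1000 : Int) - x = y := by omega
          simp [pvF, this, hsubW y (by simp), hx500]
        have hfy : pvF vals a y = (a.count y : Int) := by
          have : (1000 : Int) - y = x := by omega
          simp [pvF, this, hsubW x (by simp), show y ≠ 500 by omega]
        simp [hfx, hfy]
        ring
      · -- drop the tail y: its partner is below every window value
        rw [if_neg (by omega), if_pos hgt]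
        have hnp : (1000 - y) ∉ vals := by
          intro hmem
          have := hlb _ (hcl y (by simp) hmem)
          omega
        have hcl' : ∀ v ∈ x :: mid, (1000 - v) ∈ vals → (1000 - v) ∈ x :: mid := by
          intro v hv hmem
          have hvW : v ∈ x :: (mid ++ [y]) := by
            rcases List.mem_cons.mp hv with hv | hv
            · simp [hv]
            · simp [hv]
          have hw := hcl v hvW hmem
          rcases List.mem_cons.mp hw with hw | hw
          · simp [hw]
          · rcases List.mem_append.mp hw with hw | hw
            · exact List.mem_cons_of_mem x hw
            · exfalso
              apply hnp
              simp at hw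
              rw [show (1000 : Int) - y = v by omega]
              exact hsubW v hvW
        have hrec := ih (x :: mid).length (by simp at hlen ⊢; omega)
          (x :: mid) u (y :: r) total i (j - 1) rfl
          (by rw [hdec]; simp)
          hi
          (by simp at hj ⊢; omega) hcl'
        rw [hrec]
        have hfy : pvF vals a y = 0 := by simp [pvF, hnp]
        simp [hfy]
        try ring

-- Source B's run-length loop over a sorted list yields the distinct values (strictly
-- increasing) paired with their multiplicities
theorem pv_rle (b : List Int) (hs : b.Pairwise (· ≤ ·)) :
    (b.foldl rleStep ([], [])).1.Pairwise (· < ·) ∧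
    (∀ w : Int, w ∈ (b.foldl rleStep ([], [])).1 ↔ w ∈ b) ∧
    (b.foldl rleStep ([], [])).2
      = (b.foldl rleStep ([], [])).1.map (fun v => (b.count v : Int)) := by
  induction b using List.reverseRecOn with
  | nil => simp
  | append_singleton b v ih =>
    have hsb : b.Pairwise (· ≤ ·) := hs.sublist (List.sublist_append_left b [v])
    have hub : ∀ w ∈ b, w ≤ v := by
      intro w hw
      exact (List.pairwise_append.mp hs).2.2 w hw v (by simp)
    obtain ⟨ih1, ih2, ih3⟩ := ih hsb
    rw [List.foldl_append, List.foldl_cons, List.foldl_nil]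
    by_cases hvin : v ∈ b
    · -- merge into the last run
      have hne : (b.foldl rleStep ([], [])).1 ≠ [] :=
        List.ne_nil_of_mem ((ih2 v).mpr hvin)
      rcases List.eq_nil_or_concat (b.foldl rleStep ([], [])).1 with h | ⟨d', w0, h⟩
      · exact absurd h hne
      rw [List.concat_eq_append] at h
      have hw0v : w0 = v := by
        have hv1 : v ∈ d' ++ [w0] := h ▸ (ih2 v).mpr hvin
        rcases List.mem_append.mp hv1 with hv1 | hv1
        · exfalso
          have hlt : v < w0 := (List.pairwise_append.mp (h ▸ ih1)).2.2 v hv1 w0 (by simp)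
          have hw0b : w0 ∈ b := (ih2 w0).mp (h ▸ (List.mem_append.mpr (Or.inr (by simp))))
          have := hub w0 hw0b
          omega
        · simp at hv1; omega
      rw [hw0v] at h
      have hcond : (b.foldl rleStep ([], [])).1 ≠ [] ∧
          (b.foldl rleStep ([], [])).1.getLast? = some v := by
        refine ⟨hne, ?_⟩
        rw [h, List.getLast?_concat]
      rw [rleStep, if_pos hcond]
      dsimp only
      refine ⟨ih1, ?_, ?_⟩
      · intro w
        rw [ih2]
        simp only [List.mem_append, List.mem_singleton]
        constructor
        · exact Or.inl
        · rintro (hw | rfl)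
          · exact hw
          · exact hvin
      · have hmid : ∀ w ∈ d', w < v := by
          intro w hw
          exact (List.pairwise_append.mp (h ▸ ih1)).2.2 w hw v (by simp)
        rw [ih3, h, List.map_append, List.map_singleton]
        rw [List.dropLast_concat, List.getLast?_concat]
        simp only [Option.getD_some, List.map_append, List.map_singleton]
        congr 1
        · apply List.map_congr_left
          intro w hw
          have hwv : w ≠ v := by have := hmid w hw; omega
          have hz : List.count w [v] = 0 := by rw [List.count_eq_zero]; simp [hwv]
          simp [List.count_append, hz]
        · simp [List.count_append]
    · -- start a new run
      have hcond : ¬ ((b.foldl rleStep ([], [])).1 ≠ [] ∧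
          (b.foldl rleStep ([], [])).1.getLast? = some v) := by
        rintro ⟨hne, hlast⟩
        exact hvin ((ih2 v).mp (List.mem_of_getLast? hlast))
      rw [rleStep, if_neg hcond]
      dsimp only
      refine ⟨?_, ?_, ?_⟩
      · rw [List.pairwise_append]
        refine ⟨ih1, by simp, ?_⟩
        intro w hw z hz
        simp only [List.mem_singleton] at hz
        have hwb := (ih2 w).mp hw
        have h1 := hub w hwb
        have h2 : w ≠ v := fun hwv => hvin (hwv ▸ hwb)
        omega
      · intro w
        simp only [List.mem_append, List.mem_singleton, ih2]
      · rw [ih3, List.map_append, List.map_singleton]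
        congr 1
        · apply List.map_congr_left
          intro w hw
          have hwv : w ≠ v := fun hwv => hvin (hwv ▸ (ih2 w).mp hw)
          have hz : List.count w [v] = 0 := by rw [List.count_eq_zero]; simp [hwv]
          simp [List.count_append, hz]
        · have : b.count v = 0 := List.count_eq_zero.mpr hvin
          simp [List.count_append, this]

theorem func_eq (a : List Int) : func a = func_alt a := by
  unfold func func_alt
  dsimp only
  rw [PySem.Dict.foldl_insert_getD_add_one_eq_counter]
  set b := PySem.List.sorted a (fun x => x) false with hb
  set vals := (b.foldl rleStep ([], [])).1 with hvals
  set cnts := (b.foldl rleStep ([], [])).2 with hcnts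
  set p : Int → Prop := fun x => x ≠ 500 ∧ (1000 - x) ∈ a with hp
  have hsb : b.Pairwise (· ≤ ·) := PySem.List.sorted_pairwise a (fun x => x)
  obtain ⟨h1, h2, h3⟩ := pv_rle b hsb
  have hcount : ∀ w : Int, b.count w = a.count w := fun w =>
    (PySem.List.sorted_perm a (fun x => x) false).count_eq w
  have h3' : cnts = vals.map (fun v => (a.count v : Int)) := by
    rw [hcnts, h3]
    apply List.map_congr_left
    intro w _
    rw [hcount]
  have hmem : ∀ v : Int, v ∈ vals ↔ v ∈ a := by
    intro v
    rw [hvals, h2, hb, PySem.List.mem_sorted]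
  have hA : a.foldl (fun (count : Int) x => if x ≠ 1000 - x ∧ (PySem.Dict.counter a).contains (1000 - x) = true then count + 1 else count) (0 : Int)
      = a.foldl (fun (count : Int) x => if p x then count + 1 else count) (0 : Int) := by
    apply PySem.List.foldl_congr_mem
    intro acc x _
    have h1' : (x ≠ 1000 - x) ↔ (x ≠ 500) := by omega
    have h2' : (PySem.Dict.counter a).contains (1000 - x) = a.contains (1000 - x) :=
      PySem.Dict.contains_counter a (1000 - x)
    simp only [hp, h1', h2', List.contains_eq_mem, decide_eq_true_eq]
  rw [hA, PySem.List.foldl_ite_add_one]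
  have hB : twoPtr vals cnts 0 ((vals.length : Int) - 1) 0
      = 0 + (vals.map (pvF vals a)).sum := by
    refine pv_twoPtr vals cnts a h1 h3' vals.length vals [] [] 0 0 ((vals.length : Int) - 1)
      rfl (by simp) (by simp) (by omega) ?_
    intro v _ hv; exact hv
  rw [hB]
  have hmap : vals.map (pvF vals a) = vals.map (fun k => if p k then (a.count k : Int) else 0) := by
    apply List.map_congr_left
    intro k _
    simp only [pvF, hp, hmem]
  rw [hmap]
  have hperm : List.Perm vals (PySem.Set.ofList a) := by
    refine (List.perm_ext_iff_of_nodup ?_ (PySem.Set.nodup_ofList a)).mpr ?_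
    · exact h1.imp (fun h => ne_of_lt h)
    · intro x
      rw [hmem, PySem.Set.mem_ofList]
  rw [(hperm.map _).sum_eq, pv_key a p]

-- ===== VERDICT (by name: the statement is the Claim_ definition above) =====
theorem func_spec : Claim_equal_func := by
  intro a _
  unfold Spec_func
  exact func_eq a
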